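-- pv_equiv track=rewrite | github.com/JakubSokol/pp1 | 09-Test2/p3.py | f
-- ===== SOURCE A (Python) =====
-- def f(array2D):
--     sum1=0
--     sum2=0
--     sum3=0
--     sum4=0
--     x=[]
--     for i in range(0,len(array2D)):
--         for j in range(0,len(array2D[i])):
--             if j==0:
--                 sum1=sum1+array2D[i][j]
--             if j==1:
--                 sum2=sum2+array2D[i][j]
--             if j==2:
--                 sum3=sum3+array2D[i][j]
--             if j==3:
--                 sum4=sum4+array2D[i][j]
--     x.append(sum1)
--     x.append(sum2)
--     x.append(sum3)
--     x.append(sum4)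
--     return x
-- ===== SOURCE B (Python) =====
-- def f(array2D):
--     return [sum(row[k] for row in array2D if len(row) > k) for k in range(4)]
-- ===== Notes on version B (the rewrite author's own statement) =====
-- stated objective: simpler
-- what changed: Replaces the row-major nested loop with four running accumulators by a column-major computation: one comprehension per column k in range(4), summing row[k] over rows long enough, with no mutable state.
import Mathlib
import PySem

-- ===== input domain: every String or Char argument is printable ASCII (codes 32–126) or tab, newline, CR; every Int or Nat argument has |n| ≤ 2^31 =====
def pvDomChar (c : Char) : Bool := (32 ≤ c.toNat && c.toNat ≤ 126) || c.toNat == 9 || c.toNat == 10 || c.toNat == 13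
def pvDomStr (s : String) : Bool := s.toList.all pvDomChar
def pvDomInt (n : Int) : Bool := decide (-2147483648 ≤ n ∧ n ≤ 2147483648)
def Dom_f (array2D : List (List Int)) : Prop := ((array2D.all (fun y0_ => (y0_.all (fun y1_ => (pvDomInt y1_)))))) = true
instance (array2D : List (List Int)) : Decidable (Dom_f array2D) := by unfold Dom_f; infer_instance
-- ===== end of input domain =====

-- B sums each of the four columns independently (column-major, one pass per column, no accumulators)
-- instead of A's single row-major nested loop with four running sums; objective: simpler.

-- ===== PORT A =====
-- inner body of A's j-loop: four sequential ifs updating (sum1,sum2,sum3,sum4)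
def fStep (row : List Int) (s : Int × Int × Int × Int) (j : Nat) : Int × Int × Int × Int :=
  let s := if j = 0 then (s.1 + row.getD j 0, s.2.1, s.2.2.1, s.2.2.2) else s
  let s := if j = 1 then (s.1, s.2.1 + row.getD j 0, s.2.2.1, s.2.2.2) else s
  let s := if j = 2 then (s.1, s.2.1, s.2.2.1 + row.getD j 0, s.2.2.2) else s
  let s := if j = 3 then (s.1, s.2.1, s.2.2.1, s.2.2.2 + row.getD j 0) else s
  s

def f (array2D : List (List Int)) : List Int :=
  let s :=
    (List.range array2D.length).foldl
      (fun s i =>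
        let row := array2D.getD i []
        (List.range row.length).foldl (fStep row) s)
      (0, 0, 0, 0)
  [s.1, s.2.1, s.2.2.1, s.2.2.2]

-- ===== PORT B =====
def f_alt (array2D : List (List Int)) : List Int :=
  (List.range 4).map (fun k =>
    ((array2D.filter (fun row => decide (k < row.length))).map (fun row => row.getD k 0)).sum)

-- ===== PRECONDITION & SPEC =====
def Spec_f (array2D : List (List Int)) (out : List Int) : Prop := out = f_alt array2D
instance (array2D : List (List Int)) (out : List Int) : Decidable (Spec_f array2D out) := by unfold Spec_f; infer_instance

-- ===== CLAIM (what is proved, stated in full; the proofs are below) =====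
def Claim_equal_f : Prop := ∀ (array2D : List (List Int)), Dom_f array2D → Spec_f array2D (f array2D)

-- ===== LEMMAS AND PROOFS =====

-- element k contributes iff k < row.length
def gval (row : List Int) (k : Nat) : Int := if k < row.length then row.getD k 0 else 0

lemma inner_fold (row : List Int) (l : List Nat) (s : Int × Int × Int × Int) :
    l.foldl (fStep row) s =
      (s.1 + ((l.filter (· = 0)).map (fun j => row.getD j 0)).sum,
       s.2.1 + ((l.filter (· = 1)).map (fun j => row.getD j 0)).sum,
       s.2.2.1 + ((l.filter (· = 2)).map (fun j => row.getD j 0)).sum,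
       s.2.2.2 + ((l.filter (· = 3)).map (fun j => row.getD j 0)).sum) := by
  induction l generalizing s with
  | nil => simp
  | cons j l ih =>
    simp only [List.foldl_cons, ih]
    rcases s with ⟨s1, s2, s3, s4⟩
    by_cases h0 : j = 0 <;> by_cases h1 : j = 1 <;> by_cases h2 : j = 2 <;> by_cases h3 : j = 3 <;>
      simp_all [fStep] <;> ring

lemma range_filter_eq (n k : Nat) :
    (List.range n).filter (· = k) = if k < n then [k] else [] := by
  induction n with
  | zero => simp
  | succ n ih =>
    rw [List.range_succ, List.filter_append, ih]
    by_cases h : k < n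
    · have hne : n ≠ k := by omega
      simp [h, hne, show k < n + 1 by omega]
    · by_cases h2 : n = k
      · subst h2; simp
      · simp [h, h2, show ¬ k < n + 1 by omega]

lemma inner_fold_range (row : List Int) (s : Int × Int × Int × Int) :
    (List.range row.length).foldl (fStep row) s =
      (s.1 + gval row 0, s.2.1 + gval row 1, s.2.2.1 + gval row 2, s.2.2.2 + gval row 3) := by
  rw [inner_fold]
  have h : ∀ k, (((List.range row.length).filter (· = k)).map (fun j => row.getD j 0)).sum = gval row k := by
    intro k
    rw [range_filter_eq]
    by_cases hk : k < row.length <;> simp [hk, gval]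
  rw [h 0, h 1, h 2, h 3]

lemma colSum_eq (k : Nat) (rows : List (List Int)) :
    ((rows.filter (fun row => decide (k < row.length))).map (fun row => row.getD k 0)).sum
      = (rows.map (fun row => gval row k)).sum := by
  induction rows with
  | nil => simp
  | cons r rows ih =>
    simp only [List.getD] at ih
    rw [List.filter_cons]
    by_cases h : k < r.length <;> simp [h, gval, ih]

lemma outer_fold (rows : List (List Int)) (s : Int × Int × Int × Int) :
    rows.foldl (fun s row => (List.range row.length).foldl (fStep row) s) s =
      (s.1 + (rows.map (fun row => gval row 0)).sum,
       s.2.1 + (rows.map (fun row => gval row 1)).sum,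
       s.2.2.1 + (rows.map (fun row => gval row 2)).sum,
       s.2.2.2 + (rows.map (fun row => gval row 3)).sum) := by
  induction rows generalizing s with
  | nil => simp
  | cons r rows ih =>
    simp only [List.foldl_cons, inner_fold_range r s, ih, List.map_cons, List.sum_cons]
    ring_nf

-- A's index loop over range(len) with getD equals the direct fold over the rows
lemma f_eq_outer (array2D : List (List Int)) :
    (List.range array2D.length).foldl
      (fun s i =>
        let row := array2D.getD i []
        (List.range row.length).foldl (fStep row) s)
      (0, 0, 0, 0) =
    array2D.foldl (fun s row => (List.range row.length).foldl (fStep row) s) (0, 0, 0, 0) := by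
  have hmap : (List.range array2D.length).map (fun i => array2D.getD i []) = array2D := by
    apply List.ext_getElem
    · simp
    · intro i h1 h2
      simp [List.getElem?_eq_getElem h2]
  conv_rhs => rw [← hmap]
  rw [List.foldl_map]

-- ===== VERDICT (by name: the statement is the Claim_ definition above) =====
theorem f_spec : Claim_equal_f := by
  intro a _
  show f a = f_alt a
  unfold f f_alt
  simp only [f_eq_outer, outer_fold]
  have h4 : List.range 4 = [0, 1, 2, 3] := by decide
  rw [h4]
  simp only [List.map_cons, List.map_nil]
  have h : ∀ k, ((a.filter (fun row => decide (k < row.length))).map (fun row => row.getD k 0)).sum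
      = (a.map (fun row => gval row k)).sum := fun k => colSum_eq k a
  rw [h 0, h 1, h 2, h 3]
  simp
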